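-- pv_equiv track=rewrite | github.com/pontikos/UniProt | relStatsMap.py | parseRL
-- ===== SOURCE A (Python) =====
-- def parseRL(lista):
--     if not lista: return 0
--     tmp = ''
--     rls = []
--     for item in lista:
--         if item.endswith('.'):
--             rls.append(tmp + item)
--             tmp = ''
--         else:
--             tmp += item + ' '
--     return rls
-- ===== SOURCE B (Python) =====
-- def parseRL(lista):
--     if not lista: return 0
--     out = []
--     rest = lista
--     while True:
--         idx = None
--         for i, tok in enumerate(rest):
--             if tok.endswith('.'):
--                 idx = i
--                 break
--         if idx is None:
--             return out
--         out.append(' '.join(rest[:idx + 1]))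
--         rest = rest[idx + 1:]
-- ===== Notes on version B (the rewrite author's own statement) =====
-- stated objective: alternative
-- what changed: A glues a growing string buffer character-by-token in one stateful pass; B repeatedly scans for the next '.'-ending token and emits ' '.join of that whole slice, recursing on the remainder (no running string state).
-- outside the precondition, e.g. on parseRL([]): A returns 0, B returns 0
import Mathlib
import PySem

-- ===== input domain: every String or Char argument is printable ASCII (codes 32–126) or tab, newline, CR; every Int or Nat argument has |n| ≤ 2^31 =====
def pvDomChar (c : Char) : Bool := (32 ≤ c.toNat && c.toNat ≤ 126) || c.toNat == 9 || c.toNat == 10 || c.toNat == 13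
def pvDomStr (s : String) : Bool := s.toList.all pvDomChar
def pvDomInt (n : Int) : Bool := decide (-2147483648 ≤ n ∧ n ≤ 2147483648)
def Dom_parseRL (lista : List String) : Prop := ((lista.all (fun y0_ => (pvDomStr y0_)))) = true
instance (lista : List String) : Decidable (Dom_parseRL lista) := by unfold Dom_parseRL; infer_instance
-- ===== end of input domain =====

-- B rebuilds each sentence by scanning for the next '.'-ending token and joining the whole
-- slice at once, instead of A's character-accumulating running buffer; same cost (alternative decomposition).

-- ===== PORT A =====
-- the for-loop over lista with state (tmp, rls)
def pvALoop (l : List String) (tmp : String) (rls : List String) : List String :=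
  match l with
  | [] => rls
  | item :: rest =>
    if PySem.Str.endswith item "." then
      pvALoop rest "" (rls ++ [tmp ++ item])
    else
      pvALoop rest (tmp ++ item ++ " ") rls

-- on [] the Python returns the int 0 (not a list); that input is excluded by Pre_parseRL below
def parseRL (lista : List String) : List String :=
  pvALoop lista "" []

-- ===== PORT B =====
-- Source B's inner 'for i, tok in enumerate(rest): if tok.endswith('.'): idx = i; break' is the
-- first-index scan List.findIdx?; rest[:idx+1] / rest[idx+1:] are take/drop (exact: bounds are
-- nonnegative and ≤ len(rest) here); ' '.join is PySem.Str.join " ".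
def pvBGo (rest : List String) (out : List String) : List String :=
  match h : rest.findIdx? (fun tok => PySem.Str.endswith tok ".") with
  | none => out
  | some i =>
    pvBGo (rest.drop (i + 1)) (out ++ [PySem.Str.join " " (rest.take (i + 1))])
termination_by rest.length
decreasing_by
  have hi : i < rest.length := (List.findIdx?_eq_some_iff_findIdx_eq.mp h).1
  simp [List.length_drop]; omega

def parseRL_alt (lista : List String) : List String :=
  pvBGo lista []

-- ===== PRECONDITION & SPEC =====
-- Pre_ excludes only the empty list, on which the Python A returns the int 0, not a list of strings.
def Pre_parseRL (lista : List String) : Prop := lista ≠ []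
instance (lista : List String) : Decidable (Pre_parseRL lista) := by unfold Pre_parseRL; infer_instance
def pvWitness_parseRL : List String := ["a", "b.", "c."]

def Spec_parseRL (lista : List String) (out : List String) : Prop := out = parseRL_alt lista
instance (lista : List String) (out : List String) : Decidable (Spec_parseRL lista out) := by unfold Spec_parseRL; infer_instance

-- ===== CLAIM (what is proved, stated in full; the proofs are below) =====
def Claim_equal_parseRL : Prop := ∀ (lista : List String), Dom_parseRL lista → Pre_parseRL lista → Spec_parseRL lista (parseRL lista)

-- ===== LEMMAS AND PROOFS =====

-- A's running buffer after consuming the pending (no '.') tokens p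
def pvGlue (p : List String) : String :=
  match p with
  | [] => ""
  | x :: xs => x ++ " " ++ pvGlue xs

theorem pvGlue_snoc (p : List String) (x : String) :
    pvGlue (p ++ [x]) = pvGlue p ++ x ++ " " := by
  induction p with
  | nil => simp [pvGlue]
  | cons y ys ih =>
    apply String.toList_inj.mp
    simp only [List.cons_append, pvGlue, String.toList_append]
    rw [congrArg String.toList ih]
    simp [String.toList_append]

theorem pvJoin_space (p : List String) (d : String) :
    PySem.Str.join " " (p ++ [d]) = pvGlue p ++ d := by
  induction p with
  | nil =>
    apply String.toList_inj.mp
    simp [PySem.Str.toList_join, PySem.Chars.join, pvGlue, List.intercalate]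
  | cons y ys ih =>
    apply String.toList_inj.mp
    simp only [List.cons_append, PySem.Str.toList_join, List.map_cons]
    have hys : (ys ++ [d]).map String.toList ≠ [] := by simp
    cases hm : (ys ++ [d]).map String.toList with
    | nil => exact absurd hm hys
    | cons z zs =>
      rw [PySem.Chars.join_cons_cons]
      have := congrArg String.toList ih
      simp only [PySem.Str.toList_join, hm] at this
      rw [this]
      simp [pvGlue, String.toList_append]

theorem pvBGo_none (rest out : List String)
    (h : rest.findIdx? (fun tok => PySem.Str.endswith tok ".") = none) :
    pvBGo rest out = out := by
  rw [pvBGo]; split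
  · rfl
  · rename_i i heq
    have heq' : rest.findIdx? (fun tok => PySem.Str.endswith tok ".") = some i := heq
    rw [h] at heq'; cases heq'

theorem pvBGo_some (rest out : List String) (i : Nat)
    (h : rest.findIdx? (fun tok => PySem.Str.endswith tok ".") = some i) :
    pvBGo rest out = pvBGo (rest.drop (i + 1)) (out ++ [PySem.Str.join " " (rest.take (i + 1))]) := by
  rw [pvBGo]; split
  · rename_i heq
    have heq' : rest.findIdx? (fun tok => PySem.Str.endswith tok ".") = none := heq
    rw [h] at heq'; cases heq'
  · rename_i j heq
    have heq' : rest.findIdx? (fun tok => PySem.Str.endswith tok ".") = some j := heq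
    rw [h] at heq'
    injection heq' with e; subst e; rfl

theorem pvFindIdx?_boundary (p : List String) (item : String) (rest : List String)
    (hp : ∀ x ∈ p, PySem.Str.endswith x "." = false)
    (hi : PySem.Str.endswith item "." = true) :
    (p ++ item :: rest).findIdx? (fun tok => PySem.Str.endswith tok ".") = some p.length := by
  induction p with
  | nil =>
    have hi' : PySem.Chars.endswith item.toList ['.'] = true := by simpa using hi
    simp [List.findIdx?_cons, hi']
  | cons y ys ih =>
    have hy := hp y (by simp)
    simp only [List.cons_append, List.findIdx?_cons, hy]
    rw [ih (fun x hx => hp x (by simp [hx]))]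
    simp

theorem pvMain (l : List String) : ∀ (p rls : List String),
    (∀ x ∈ p, PySem.Str.endswith x "." = false) →
    pvBGo (p ++ l) rls = pvALoop l (pvGlue p) rls := by
  induction l with
  | nil =>
    intro p rls hp
    rw [List.append_nil, pvALoop, pvBGo_none]
    rw [List.findIdx?_eq_none_iff]
    intro x hx
    simpa using hp x hx
  | cons item rest ih =>
    intro p rls hp
    by_cases h : PySem.Str.endswith item "." = true
    · rw [pvBGo_some _ _ p.length (pvFindIdx?_boundary p item rest hp h)]
      have hdrop : (p ++ item :: rest).drop (p.length + 1) = rest := by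
        have : p ++ item :: rest = (p ++ [item]) ++ rest := by simp
        rw [this]
        have : p.length + 1 = (p ++ [item]).length := by simp
        rw [this, List.drop_left]
      have htake : (p ++ item :: rest).take (p.length + 1) = p ++ [item] := by
        have : p ++ item :: rest = (p ++ [item]) ++ rest := by simp
        rw [this]
        have : p.length + 1 = (p ++ [item]).length := by simp
        rw [this, List.take_left]
      rw [hdrop, htake, pvJoin_space]
      have := ih [] (rls ++ [pvGlue p ++ item]) (by simp)
      simp only [List.nil_append] at this
      rw [this]
      have hC : PySem.Chars.endswith item.toList ['.'] = true := by simpa using h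
      simp [pvALoop, hC, pvGlue]
    · have h' : PySem.Str.endswith item "." = false := by
        cases hb : PySem.Str.endswith item "." with
        | true => exact absurd hb h
        | false => rfl
      have hcons : p ++ item :: rest = (p ++ [item]) ++ rest := by simp
      rw [hcons, ih (p ++ [item]) rls (by
        intro x hx
        rcases List.mem_append.mp hx with hx | hx
        · exact hp x hx
        · simp at hx; subst hx; exact h')]
      rw [pvGlue_snoc]
      have hC : PySem.Chars.endswith item.toList ['.'] = false := by simpa using h'
      simp [pvALoop, hC]

-- ===== VERDICT (by name: the statement is the Claim_ definition above) =====
theorem parseRL_spec : Claim_equal_parseRL := by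
  intro lista _ _
  unfold Spec_parseRL parseRL parseRL_alt
  have := pvMain lista [] [] (by simp)
  simp only [List.nil_append] at this
  rw [this]; rfl
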